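-- pv_equiv track=rewrite | github.com/hooneyskywalker0127/coding-test-practice | 프로그래머스/0/181887. 홀수 vs 짝수/홀수 vs 짝수.py | solution
-- ===== SOURCE A (Python) =====
-- def solution(num_list):
--     even = 0
--     odd = 0
--     for a in range(len(num_list)):
--         if a%2 == 0:
--             even += num_list[a]
--         else:
--             odd += num_list[a]
--
--     if odd > even :
--         answer = odd
--     else:
--         answer = even
--
--     return answer
-- ===== SOURCE B (Python) =====
-- def solution(num_list):
--     # two staged passes over stride-partitioned slices; no index loop, no parity test
--     return max(sum(num_list[::2]), sum(num_list[1::2]))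
-- ===== Notes on version B (the rewrite author's own statement) =====
-- stated objective: simpler
-- what changed: Replaces the single index loop with a per-index modulo parity branch by two staged passes: sum the stride-2 slices num_list[::2] and num_list[1::2] and take the max; no indexing, no modulo, no accumulator pair.
import Mathlib
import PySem

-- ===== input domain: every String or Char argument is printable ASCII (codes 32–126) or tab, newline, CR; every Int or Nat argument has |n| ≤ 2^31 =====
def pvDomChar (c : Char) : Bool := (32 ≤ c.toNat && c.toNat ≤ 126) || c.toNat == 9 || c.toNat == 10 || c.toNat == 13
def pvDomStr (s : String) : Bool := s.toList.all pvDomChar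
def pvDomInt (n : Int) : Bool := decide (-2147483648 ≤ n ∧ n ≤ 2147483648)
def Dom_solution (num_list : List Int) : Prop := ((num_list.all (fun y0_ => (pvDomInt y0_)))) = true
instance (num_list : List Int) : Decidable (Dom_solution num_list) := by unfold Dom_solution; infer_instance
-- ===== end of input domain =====

-- B replaces A's index loop with its per-index modulo parity branch by two staged passes
-- over the stride-2 slices num_list[::2] and num_list[1::2], then max (objective: simpler).


-- ===== PORT A =====
def solution (num_list : List Int) : Int :=
  let p := (PySem.List.pyRange 0 num_list.length 1).foldl
    (fun (s : Int × Int) a =>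
      if PySem.Int.mod a 2 = 0 then (s.1 + PySem.List.pyGetD num_list a 0, s.2)
      else (s.1, s.2 + PySem.List.pyGetD num_list a 0)) (0, 0)
  if p.2 > p.1 then p.2 else p.1

-- ===== PORT B =====
-- Source B: return max(sum(num_list[::2]), sum(num_list[1::2]))
-- (.getD [] only discharges slice?'s step=0 none case, unreachable with literal step 2)
def solution_alt (num_list : List Int) : Int :=
  let ev := ((PySem.List.slice? num_list none none 2).getD []).sum
  let od := ((PySem.List.slice? num_list (some 1) none 2).getD []).sum
  max ev od

-- ===== PRECONDITION & SPEC =====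
def Spec_solution (num_list : List Int) (out : Int) : Prop := out = solution_alt num_list
instance (num_list : List Int) (out : Int) : Decidable (Spec_solution num_list out) := by unfold Spec_solution; infer_instance

-- ===== CLAIM (what is proved, stated in full; the proofs are below) =====
def Claim_equal_solution : Prop := ∀ (num_list : List Int), Dom_solution num_list → Spec_solution num_list (solution num_list)

-- ===== LEMMAS AND PROOFS =====

-- the elements at even positions
def pvEvens : List Int → List Int
  | [] => []
  | [x] => [x]
  | x :: _ :: xs => x :: pvEvens xs

theorem pvEvens_cons (a : Int) (l : List Int) : pvEvens (a :: l) = a :: pvEvens l.tail := by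
  cases l <;> rfl

-- the role-swapping pair: (sum at even indices, sum at odd indices)
def pvSums : List Int → Int × Int
  | [] => (0, 0)
  | x :: xs => (x + (pvSums xs).2, (pvSums xs).1)

def pvF : Int × Int → Int × Int → Int × Int :=
  fun s q => if PySem.Int.mod q.1 2 = 0 then (s.1 + q.2, s.2) else (s.1, s.2 + q.2)

theorem pvA_enum (xs : List Int) : ∀ (t e o : Int),
    (PySem.List.enumerate xs t).foldl pvF (e, o) =
      if t % 2 = 0 then (e + (pvSums xs).1, o + (pvSums xs).2)
      else (e + (pvSums xs).2, o + (pvSums xs).1) := by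
  induction xs with
  | nil => intro t e o; simp [PySem.List.enumerate_nil, pvSums]
  | cons x xs ih =>
    intro t e o
    rw [PySem.List.enumerate_cons, List.foldl_cons]
    by_cases h : t % 2 = 0
    · have h' : (t + 1) % 2 ≠ 0 := by omega
      simp [pvF, h, ih, h', pvSums]
      ring
    · have h' : (t + 1) % 2 = 0 := by omega
      simp [pvF, h, ih, h', pvSums]
      ring

theorem pvA_fold (xs : List Int) :
    (PySem.List.pyRange 0 xs.length 1).foldl
      (fun (s : Int × Int) a =>
        if PySem.Int.mod a 2 = 0 then (s.1 + PySem.List.pyGetD xs a 0, s.2)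
        else (s.1, s.2 + PySem.List.pyGetD xs a 0)) (0, 0) = pvSums xs := by
  have he := PySem.List.enumerate_eq_map_pyRange (xs := xs) (d := 0)
  have : (PySem.List.enumerate xs 0).foldl pvF ((0 : Int), (0 : Int)) =
      (PySem.List.pyRange 0 xs.length 1).foldl
        (fun (s : Int × Int) a =>
          if PySem.Int.mod a 2 = 0 then (s.1 + PySem.List.pyGetD xs a 0, s.2)
          else (s.1, s.2 + PySem.List.pyGetD xs a 0)) (0, 0) := by
    rw [he, List.foldl_map]; rfl
  rw [← this, pvA_enum]
  simp

theorem pvFilterMap_evens (xs : List Int) :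
    List.filterMap (fun (k : Nat) => xs[((0:Int) + 2 * (k : Int)).toNat]?)
      (List.range ((xs.length + 1) / 2)) = pvEvens xs := by
  induction xs using pvEvens.induct with
  | case1 => simp [pvEvens]
  | case2 x => simp [pvEvens]
  | case3 x y xs ih =>
    have hc : ((x :: y :: xs).length + 1) / 2 = (xs.length + 1) / 2 + 1 := by
      simp; omega
    rw [hc, List.range_succ_eq_map, List.filterMap_cons, List.filterMap_map]
    have hf : ((fun (k : Nat) => (x :: y :: xs)[((0:Int) + 2 * (k : Int)).toNat]?) ∘ Nat.succ) =
        (fun (k : Nat) => xs[((0:Int) + 2 * (k : Int)).toNat]?) := by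
      funext k
      have h2 : ((0:Int) + 2 * ((Nat.succ k : Nat) : Int)).toNat
          = ((0:Int) + 2 * (k : Int)).toNat + 2 := by push_cast; omega
      simp only [Function.comp_def, h2]
      rfl
    rw [hf, ih]
    rfl

theorem pvSlice2_even (xs : List Int) :
    PySem.List.slice? xs none none 2 = some (pvEvens xs) := by
  have hr : PySem.List.slice? xs none none 2 =
      some (List.filterMap (fun (k : Nat) => xs[((0:Int) + 2 * (k : Int)).toNat]?)
        (List.range (if (0:Int) < (xs.length : Int)
          then (((xs.length : Int) - 0 + 2 - 1) / 2).toNat else 0))) := rfl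
  rw [hr]
  have hc : (if (0:Int) < (xs.length : Int)
      then (((xs.length : Int) - 0 + 2 - 1) / 2).toNat else 0) = (xs.length + 1) / 2 := by
    split_ifs with h
    · omega
    · omega
  rw [hc, pvFilterMap_evens]

theorem pvSlice2_odd (xs : List Int) :
    PySem.List.slice? xs (some 1) none 2 = some (pvEvens xs.tail) := by
  have hr : PySem.List.slice? xs (some 1) none 2 =
      some (List.filterMap
        (fun (k : Nat) => xs[(min 1 (xs.length : Int) + 2 * (k : Int)).toNat]?)
        (List.range (if min 1 (xs.length : Int) < (xs.length : Int)
          then (((xs.length : Int) - min 1 (xs.length : Int) + 2 - 1) / 2).toNat else 0))) := rfl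
  rw [hr]
  cases xs with
  | nil => rfl
  | cons x t =>
    have hm : min 1 ((x :: t).length : Int) = 1 := by
      simp only [List.length_cons]; push_cast; omega
    rw [hm]
    have hc : (if (1:Int) < ((x :: t).length : Int)
        then ((((x :: t).length : Int) - 1 + 2 - 1) / 2).toNat else 0) = (t.length + 1) / 2 := by
      split_ifs with h
      · simp only [List.length_cons] at h ⊢; push_cast at h ⊢; omega
      · simp only [List.length_cons] at h ⊢; push_cast at h ⊢; omega
    rw [hc]
    have hf : (fun (k : Nat) => (x :: t)[((1:Int) + 2 * (k : Int)).toNat]?) =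
        (fun (k : Nat) => t[((0:Int) + 2 * (k : Int)).toNat]?) := by
      funext k
      have h2 : ((1:Int) + 2 * (k : Int)).toNat = ((0:Int) + 2 * (k : Int)).toNat + 1 := by omega
      rw [h2]; rfl
    rw [hf, pvFilterMap_evens]
    rfl

theorem pvSums_evens (xs : List Int) :
    pvSums xs = ((pvEvens xs).sum, (pvEvens xs.tail).sum) := by
  induction xs with
  | nil => rfl
  | cons x xs ih =>
    simp [pvSums, ih, pvEvens_cons]

-- ===== VERDICT (by name: the statement is the Claim_ definition above) =====
theorem solution_spec : Claim_equal_solution := by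
  intro num_list _
  unfold Spec_solution solution solution_alt
  rw [pvA_fold, pvSums_evens, pvSlice2_even, pvSlice2_odd]
  simp only [Option.getD_some, gt_iff_lt]
  split_ifs with h
  · exact (max_eq_right h.le).symm
  · exact (max_eq_left (not_lt.mp h)).symm
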